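-- pv_equiv track=rewrite | github.com/PointOne1/Python-Snake-Classic | main.py | cbstring
-- ===== SOURCE A (Python) =====
-- def cbstring(a="", x=1, y=1, z = False):
--     '''
--     Coordinate Based Printing Help (By Ryhan.N):
--     Arg1 (string) = String to be printed
--     Arg2 (+int) = X-Coordinate
--     Arg3 (+int) = Y-Coordinate
--     Arg4 (True/False) = Transparency (Can greatly reduce performance when turned On!) Default: False
--     TIPS: 1) You can print strings in triple quotations!
--     '''
--     b = ""
--     for j in a.split("\n"):
--         c = x
--         if z == True:
--             for i in j.split(" "):
--                 if i != "":
--                     b += f"\033[{y};{c}H" + i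
--                     c += len(i) + 1
--                 else:
--                     c += 1
--         else:
--             b += f"\033[{y};{x}H" + j
--         y += 1
--     return b
-- ===== SOURCE B (Python) =====
-- def cbstring(a="", x=1, y=1, z=False):
--     parts = []
--     row = y
--     for line in a.split("\n"):
--         if z == True:
--             run = []
--             start = 0
--             p = 0
--             for ch in line:
--                 if ch == ' ':
--                     if run:
--                         parts.append(f"\033[{row};{x + start}H" + "".join(run))
--                         run = []
--                 else:
--                     if not run:
--                         start = p
--                     run.append(ch)
--                 p += 1
--             if run:
--                 parts.append(f"\033[{row};{x + start}H" + "".join(run))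
--         else:
--             parts.append(f"\033[{row};{x}H" + line)
--         row += 1
--     return "".join(parts)
-- ===== Notes on version B (the rewrite author's own statement) =====
-- stated objective: alternative
-- what changed: The transparent branch no longer splits each line on the space character and maintains a running column accumulator over tokens (with an empty-token special case); B scans each line once character by character with a small state machine that records every word's start offset, and the output is collected as a list of pieces joined once at the end instead of repeated string concatenation.
import Mathlib
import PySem

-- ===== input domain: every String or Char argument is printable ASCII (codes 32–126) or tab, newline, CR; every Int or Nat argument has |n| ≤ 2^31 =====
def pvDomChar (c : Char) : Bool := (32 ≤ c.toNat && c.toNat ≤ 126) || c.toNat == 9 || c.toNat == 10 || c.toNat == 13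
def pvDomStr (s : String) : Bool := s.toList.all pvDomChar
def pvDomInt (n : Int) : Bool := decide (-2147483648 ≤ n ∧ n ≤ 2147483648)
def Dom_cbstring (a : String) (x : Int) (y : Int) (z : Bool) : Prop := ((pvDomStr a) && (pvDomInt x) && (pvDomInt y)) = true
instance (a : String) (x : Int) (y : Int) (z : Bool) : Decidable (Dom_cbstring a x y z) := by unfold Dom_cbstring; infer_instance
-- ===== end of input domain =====

-- B replaces A's split(' ')-and-running-column token loop by a single char-by-char scan
-- per line that records each word's start offset (objective: alternative, same cost).

-- f"\033[{r};{c}H"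
def pvEsc (r c : Int) : List Char :=
  '\x1b' :: '[' :: (PySem.Int.toChars r ++ ';' :: (PySem.Int.toChars c ++ ['H']))

-- ===== PORT A =====
-- A's inner loop over j.split(" ") with running column c
def pvInnerA (yy : Int) (st : List Char × Int) (toks : List (List Char)) : List Char × Int :=
  toks.foldl
    (fun st2 i =>
      if i ≠ [] then (st2.1 ++ pvEsc yy st2.2 ++ i, st2.2 + (i.length : Int) + 1)
      else (st2.1, st2.2 + 1)) st

-- body of A's outer loop (b, y) ↦ next (b, y)
def pvStepAOuter (x : Int) (z : Bool) (st : List Char × Int) (j : List Char) : List Char × Int :=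
  ((if z == true then (pvInnerA st.2 (st.1, x) (PySem.Chars.splitOn j [' '])).1
    else st.1 ++ pvEsc st.2 x ++ j), st.2 + 1)

def cbstring (a : String) (x : Int) (y : Int) (z : Bool) : String :=
  String.mk ((PySem.Chars.splitOn a.toList ['\n']).foldl (pvStepAOuter x z) ([], y)).1

-- ===== PORT B =====
-- B's per-character state machine: (parts, run, start, p)
def pvStepB (row x : Int) (st : List (List Char) × List Char × Int × Int) (ch : Char) :
    List (List Char) × List Char × Int × Int :=
  if ch = ' ' then
    if st.2.1 ≠ [] then
      (st.1 ++ [pvEsc row (x + st.2.2.1) ++ st.2.1], [], st.2.2.1, st.2.2.2 + 1)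
    else (st.1, st.2.1, st.2.2.1, st.2.2.2 + 1)
  else
    (st.1, st.2.1 ++ [ch], (if st.2.1 = [] then st.2.2.2 else st.2.2.1), st.2.2.2 + 1)

-- the trailing 'if run: parts.append(...)'
def pvFlushB (row x : Int) (st : List (List Char) × List Char × Int × Int) : List (List Char) :=
  if st.2.1 ≠ [] then st.1 ++ [pvEsc row (x + st.2.2.1) ++ st.2.1] else st.1

def pvLineB (row x : Int) (j : List Char) : List (List Char) :=
  pvFlushB row x (j.foldl (pvStepB row x) ([], [], 0, 0))

-- body of B's outer loop (parts, row) ↦ next (parts, row)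
def pvStepBOuter (x : Int) (z : Bool) (st : List (List Char) × Int) (line : List Char) :
    List (List Char) × Int :=
  ((if z == true then st.1 ++ pvLineB st.2 x line else st.1 ++ [pvEsc st.2 x ++ line]), st.2 + 1)

def cbstring_alt (a : String) (x : Int) (y : Int) (z : Bool) : String :=
  String.mk ((PySem.Chars.splitOn a.toList ['\n']).foldl (pvStepBOuter x z) ([], y)).1.flatten

-- ===== PRECONDITION & SPEC =====
def Spec_cbstring (a : String) (x : Int) (y : Int) (z : Bool) (out : String) : Prop := out = cbstring_alt a x y z
instance (a : String) (x : Int) (y : Int) (z : Bool) (out : String) : Decidable (Spec_cbstring a x y z out) := by unfold Spec_cbstring; infer_instance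

-- ===== CLAIM (what is proved, stated in full; the proofs are below) =====
def Claim_equal_cbstring : Prop := ∀ (a : String) (x : Int) (y : Int) (z : Bool), Dom_cbstring a x y z → Spec_cbstring a x y z (cbstring a x y z)

-- ===== LEMMAS AND PROOFS =====

-- split on a single separator char, by structural recursion
def pvSplit1 (sep : Char) : List Char → List (List Char)
  | [] => [[]]
  | c :: rest =>
      if c = sep then [] :: pvSplit1 sep rest
      else (pvSplit1 sep rest).modifyHead (c :: ·)

lemma pvSplit1_ne_nil (sep : Char) (l : List Char) : pvSplit1 sep l ≠ [] := by
  induction l with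
  | nil => simp [pvSplit1]
  | cons c rest ih =>
      simp only [pvSplit1]
      split_ifs
      · simp
      · cases h : pvSplit1 sep rest with
        | nil => exact absurd h ih
        | cons a t => simp

lemma pvSplitOn_go_eq (sep : Char) :
    ∀ (fuel : Nat) (l cur : List Char) (acc : List (List Char)), l.length ≤ fuel →
      PySem.Chars.splitOn.go [sep] fuel l cur acc
        = acc.reverse ++ (pvSplit1 sep l).modifyHead (cur.reverse ++ ·) := by
  intro fuel
  induction fuel with
  | zero =>
      intro l cur acc h
      have : l = [] := by cases l <;> simp_all
      subst this
      simp [PySem.Chars.splitOn.go, pvSplit1]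
  | succ f ih =>
      intro l cur acc h
      cases l with
      | nil => simp [PySem.Chars.splitOn.go, pvSplit1]
      | cons c rest =>
          simp only [PySem.Chars.splitOn.go]
          by_cases hc : c = sep
          · subst hc
            have hpre : [c].isPrefixOf (c :: rest) = true := by simp [List.isPrefixOf]
            rw [if_pos hpre]
            simp only [List.length_cons, List.length_nil, List.drop_succ_cons, List.drop_zero]
            rw [ih rest [] (cur.reverse :: acc) (by simpa using Nat.le_of_succ_le_succ h)]
            simp only [pvSplit1, List.reverse_cons, List.reverse_nil, List.nil_append,
              List.append_assoc, List.singleton_append]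
            cases pvSplit1 c rest <;> simp
          · have hpre : [sep].isPrefixOf (c :: rest) = false := by
              simp [List.isPrefixOf]
              intro hco; exact absurd hco.symm hc
            rw [if_neg (by simp [hpre])]
            rw [ih rest (c :: cur) acc (by simpa using Nat.le_of_succ_le_succ h)]
            simp only [pvSplit1, if_neg hc]
            congr 1
            cases hsp : pvSplit1 sep rest with
            | nil => exact absurd hsp (pvSplit1_ne_nil sep rest)
            | cons hd tl => simp

lemma pvSplitOn_single (sep : Char) (l : List Char) :
    PySem.Chars.splitOn l [sep] = pvSplit1 sep l := by
  unfold PySem.Chars.splitOn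
  rw [pvSplitOn_go_eq sep (l.length + 1) l [] [] (Nat.le_succ _)]
  cases h : pvSplit1 sep l with
  | nil => exact absurd h (pvSplit1_ne_nil sep l)
  | cons hd tl => simp

-- B's char fold only appends to parts
lemma pvFoldB_parts (row x : Int) (j : List Char) :
    ∀ (parts : List (List Char)) (run : List Char) (start p : Int),
      j.foldl (pvStepB row x) (parts, run, start, p)
        = (parts ++ (j.foldl (pvStepB row x) ([], run, start, p)).1,
           (j.foldl (pvStepB row x) ([], run, start, p)).2) := by
  induction j with
  | nil => intro parts run start p; simp
  | cons ch rest ih =>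
      intro parts run start p
      simp only [List.foldl_cons]
      by_cases hs : ch = ' '
      · by_cases hr : run = []
        · subst hs hr
          simp only [pvStepB, ne_eq, not_true_eq_false, if_neg, not_false_iff]
          exact ih parts [] start (p + 1)
        · subst hs
          simp only [pvStepB, ne_eq, hr, not_false_iff, if_pos, List.nil_append]
          rw [ih (parts ++ [pvEsc row (x + start) ++ run]) [] start (p + 1),
              ih [pvEsc row (x + start) ++ run] [] start (p + 1)]
          simp
      · simp only [pvStepB, if_neg hs]
        exact ih parts (run ++ [ch]) _ (p + 1)

lemma pvFlushB_append (row x : Int) (parts : List (List Char))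
    (st : List (List Char) × List Char × Int × Int) :
    pvFlushB row x (parts ++ st.1, st.2) = parts ++ pvFlushB row x st := by
  obtain ⟨g, run, start, p⟩ := st
  unfold pvFlushB
  split_ifs <;> simp

-- the heart: A's token loop over pvSplit1 equals B's char scan, with and without a pending run
lemma pvMain (yy x : Int) (j : List Char) :
    (∀ (b : List Char) (p s0 : Int),
        (pvInnerA yy (b, x + p) (pvSplit1 ' ' j)).1
          = b ++ (pvFlushB yy x (j.foldl (pvStepB yy x) ([], [], s0, p))).flatten)
    ∧ (∀ (b run : List Char) (start : Int), run ≠ [] →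
        (pvInnerA yy (b, x + start) ((pvSplit1 ' ' j).modifyHead (run ++ ·))).1
          = b ++ (pvFlushB yy x
              (j.foldl (pvStepB yy x) ([], run, start, start + (run.length : Int)))).flatten) := by
  induction j with
  | nil =>
      constructor
      · intro b p s0
        simp [pvSplit1, pvInnerA, pvFlushB]
      · intro b run start hrun
        simp [pvSplit1, pvInnerA, pvFlushB, hrun]
  | cons c rest ih =>
      obtain ⟨ihL, ihR⟩ := ih
      constructor
      · intro b p s0
        by_cases hs : c = ' '
        · subst hs
          have hsp : pvSplit1 ' ' (' ' :: rest) = [] :: pvSplit1 ' ' rest := by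
            simp [pvSplit1]
          have hstep : pvStepB yy x ([], [], s0, p) ' ' = ([], [], s0, p + 1) := by
            simp [pvStepB]
          rw [hsp, List.foldl_cons, hstep]
          have hA : pvInnerA yy (b, x + p) ([] :: pvSplit1 ' ' rest)
              = pvInnerA yy (b, x + p + 1) (pvSplit1 ' ' rest) := by
            simp [pvInnerA]
          rw [hA, show x + p + 1 = x + (p + 1) by ring]
          exact ihL b (p + 1) s0
        · have hsp : pvSplit1 ' ' (c :: rest) = (pvSplit1 ' ' rest).modifyHead ([c] ++ ·) := by
            simp only [pvSplit1, if_neg hs]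
            cases pvSplit1 ' ' rest <;> simp
          have hstep : pvStepB yy x ([], [], s0, p) c = ([], [c], p, p + 1) := by
            simp [pvStepB, hs]
          rw [hsp, List.foldl_cons, hstep]
          have := ihR b [c] p (by simp)
          simpa using this
      · intro b run start hrun
        by_cases hs : c = ' '
        · subst hs
          have hsp : pvSplit1 ' ' (' ' :: rest) = [] :: pvSplit1 ' ' rest := by
            simp [pvSplit1]
          have hstep : pvStepB yy x ([], run, start, start + (run.length : Int)) ' '
              = ([pvEsc yy (x + start) ++ run], [], start, start + (run.length : Int) + 1) := by
            simp [pvStepB, hrun]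
          have hA : pvInnerA yy (b, x + start) (run :: pvSplit1 ' ' rest)
              = pvInnerA yy (b ++ pvEsc yy (x + start) ++ run,
                  x + start + (run.length : Int) + 1) (pvSplit1 ' ' rest) := by
            simp [pvInnerA, hrun]
          rw [hsp, List.modifyHead_cons, List.append_nil, List.foldl_cons, hstep, hA]
          rw [show x + start + (run.length : Int) + 1 = x + (start + (run.length : Int) + 1) by ring]
          rw [ihL (b ++ pvEsc yy (x + start) ++ run) (start + (run.length : Int) + 1) start]
          rw [pvFoldB_parts yy x rest [pvEsc yy (x + start) ++ run] [] start
              (start + (run.length : Int) + 1)]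
          rw [pvFlushB_append]
          simp
        · have hsp : pvSplit1 ' ' (c :: rest) = (pvSplit1 ' ' rest).modifyHead (c :: ·) := by
            simp [pvSplit1, hs]
          have h1 : ((pvSplit1 ' ' rest).modifyHead (c :: ·)).modifyHead (run ++ ·)
              = (pvSplit1 ' ' rest).modifyHead ((run ++ [c]) ++ ·) := by
            cases pvSplit1 ' ' rest <;> simp
          have hstep : pvStepB yy x ([], run, start, start + (run.length : Int)) c
              = ([], run ++ [c], start, start + (run.length : Int) + 1) := by
            simp [pvStepB, hs, hrun]
          rw [hsp, h1, List.foldl_cons, hstep]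
          have := ihR b (run ++ [c]) start (by simp)
          rw [show start + (run.length : Int) + 1
              = start + (((run ++ [c]).length : Nat) : Int) by push_cast [List.length_append, List.length_cons, List.length_nil]; ring]
          simpa using this

-- line-level: A's transparent branch = B's pvLineB
lemma pvLine_eq (yy x : Int) (b j : List Char) :
    (pvInnerA yy (b, x) (PySem.Chars.splitOn j [' '])).1 = b ++ (pvLineB yy x j).flatten := by
  rw [pvSplitOn_single]
  have := (pvMain yy x j).1 b 0 0
  simpa [pvLineB] using this

-- B's outer fold only appends to parts
lemma pvFoldBOuter_parts (x : Int) (z : Bool) (lines : List (List Char)) :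
    ∀ (parts : List (List Char)) (yy : Int),
      lines.foldl (pvStepBOuter x z) (parts, yy)
        = (parts ++ (lines.foldl (pvStepBOuter x z) ([], yy)).1,
           (lines.foldl (pvStepBOuter x z) ([], yy)).2) := by
  induction lines with
  | nil => intro parts yy; simp
  | cons j rest ih =>
      intro parts yy
      simp only [List.foldl_cons, pvStepBOuter, List.nil_append]
      split_ifs with hz
      · rw [ih (parts ++ pvLineB yy x j) (yy + 1), ih (pvLineB yy x j) (yy + 1)]
        simp
      · rw [ih (parts ++ [pvEsc yy x ++ j]) (yy + 1), ih [pvEsc yy x ++ j] (yy + 1)]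
        simp

lemma pvOuter_eq (x : Int) (z : Bool) (lines : List (List Char)) :
    ∀ (b : List Char) (yy : Int),
      (lines.foldl (pvStepAOuter x z) (b, yy)).1
        = b ++ ((lines.foldl (pvStepBOuter x z) ([], yy)).1).flatten := by
  induction lines with
  | nil => intro b yy; simp
  | cons j rest ih =>
      intro b yy
      simp only [List.foldl_cons, pvStepAOuter, pvStepBOuter, List.nil_append]
      split_ifs with hz
      · rw [ih ((pvInnerA yy (b, x) (PySem.Chars.splitOn j [' '])).1) (yy + 1)]
        rw [pvLine_eq]
        rw [pvFoldBOuter_parts x z rest (pvLineB yy x j) (yy + 1)]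
        simp
      · rw [ih (b ++ pvEsc yy x ++ j) (yy + 1)]
        rw [pvFoldBOuter_parts x z rest [pvEsc yy x ++ j] (yy + 1)]
        simp

-- ===== VERDICT (by name: the statement is the Claim_ definition above) =====
theorem cbstring_spec : Claim_equal_cbstring := by
  intro a x y z _
  unfold Spec_cbstring cbstring cbstring_alt
  rw [pvOuter_eq x z (PySem.Chars.splitOn a.toList ['\n']) [] y]
  simp
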